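-- pv_equiv track=rewrite | github.com/chboishabba/dashi_agda | scripts/auto_agda_reorg.py | derive_corruption_repairs
-- ===== SOURCE A (Python) =====
-- def derive_corruption_repairs(rename_map):
--     repairs = {}
--     pairs = sorted(rename_map.items(), key=lambda kv: len(kv[0]))
--     for old_a, new_a in pairs:
--         for old_b, new_b in pairs:
--             if old_a == old_b:
--                 continue
--             if old_b.startswith(old_a):
--                 bad = new_a + old_b[len(old_a) :]
--                 if bad != new_b:
--                     repairs[bad] = new_b
--     return repairs
-- ===== SOURCE B (Python) =====
-- def derive_corruption_repairs(rename_map):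
--     pairs = sorted(rename_map.items(), key=lambda kv: len(kv[0]))
--     lookup = dict(pairs)  # old -> new
--     # buckets[old_a] = the repairs generated by prefix old_a, in ascending
--     # order of the (length-sorted) position of old_b
--     buckets = {}
--     for old_b, new_b in pairs:
--         for l in range(len(old_b)):
--             p = old_b[:l]
--             new_a = lookup.get(p)
--             if new_a is not None:
--                 bad = new_a + old_b[l:]
--                 if bad != new_b:
--                     buckets.setdefault(p, []).append((bad, new_b))
--     repairs = {}
--     for old_a, _ in pairs:
--         for bad, new_b in buckets.get(old_a, []):
--             repairs[bad] = new_b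
--     return repairs
-- ===== Notes on version B (the rewrite author's own statement) =====
-- stated objective: faster
-- what changed: Instead of testing every ordered pair of keys with startswith (O(n^2*L)), B indexes the renames in a hash map, finds each key's matching prefixes by enumerating its own prefixes (O(n*L^2)), and replays the repairs grouped by prefix in A's original insertion order.
import Mathlib
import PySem

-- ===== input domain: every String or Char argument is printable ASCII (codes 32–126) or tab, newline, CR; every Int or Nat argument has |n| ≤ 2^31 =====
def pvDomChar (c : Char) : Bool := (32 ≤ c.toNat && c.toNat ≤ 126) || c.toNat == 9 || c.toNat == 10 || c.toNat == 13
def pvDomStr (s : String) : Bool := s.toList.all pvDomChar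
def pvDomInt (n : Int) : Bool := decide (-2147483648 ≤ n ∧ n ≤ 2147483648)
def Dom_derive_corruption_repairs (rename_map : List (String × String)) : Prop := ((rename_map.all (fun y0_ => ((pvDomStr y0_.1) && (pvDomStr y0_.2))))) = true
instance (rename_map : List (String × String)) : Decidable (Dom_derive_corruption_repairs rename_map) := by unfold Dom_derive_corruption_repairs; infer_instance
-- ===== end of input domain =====

-- B replaces A's quadratic pair-by-pair startswith scan by a hash index of the renames:
-- each key enumerates its own prefixes to find the matching shorter keys, the generated
-- repairs are grouped by prefix and replayed in A's original insertion order (objective: faster).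


-- ===== PORT A =====
def derive_corruption_repairs (rename_map : List (String × String)) : List (String × String) :=
  let pairs := PySem.List.sorted rename_map (fun kv => PySem.Str.len kv.1) false
  let repairs := pairs.foldl (fun repairs a =>
    pairs.foldl (fun repairs b =>
      if a.1 = b.1 then repairs
      else if PySem.Str.startswith b.1 a.1 then
        let bad := a.2 ++ PySem.Str.slice b.1 (some (PySem.Str.len a.1)) none
        if bad ≠ b.2 then repairs.insert bad b.2 else repairs
      else repairs) repairs) (PySem.Dict.empty (κ := String) (ν := String))
  repairs.items

-- ===== PORT B =====
def derive_corruption_repairs_alt (rename_map : List (String × String)) : List (String × String) :=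
  let pairs := PySem.List.sorted rename_map (fun kv => PySem.Str.len kv.1) false
  let lookup := PySem.Dict.ofList pairs            -- lookup = dict(pairs)
  -- buckets[p] = repairs generated by prefix key p, in generation order
  let buckets := pairs.foldl (fun buckets b =>
    (PySem.List.pyRange 0 (PySem.Str.len b.1) 1).foldl (fun buckets l =>
      let p := PySem.Str.slice b.1 none (some l)   -- p = old_b[:l]
      match lookup.get? p with
      | some new_a =>
        let bad := new_a ++ PySem.Str.slice b.1 (some l) none
        if bad ≠ b.2 then buckets.modify p [] (· ++ [(bad, b.2)]) else buckets
      | none => buckets) buckets)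
    (PySem.Dict.empty (κ := String) (ν := List (String × String)))
  let repairs := pairs.foldl (fun repairs a =>
    (buckets.getD a.1 []).foldl (fun repairs e => repairs.insert e.1 e.2) repairs)
    (PySem.Dict.empty (κ := String) (ν := String))
  repairs.items

-- ===== PRECONDITION & SPEC =====
-- A Python dict always has distinct keys, so the association-list encoding of the
-- argument never carries a duplicate key; Pre_ states just that (it excludes no
-- input the Python function can actually receive).
def Pre_derive_corruption_repairs (rename_map : List (String × String)) : Prop :=
  (rename_map.map Prod.fst).Nodup
instance (rename_map : List (String × String)) : Decidable (Pre_derive_corruption_repairs rename_map) := by unfold Pre_derive_corruption_repairs; infer_instance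

def pvWitness_derive_corruption_repairs : (List (String × String)) :=
  [("app", "core"), ("apple", "pie"), ("b", "q")]

def Spec_derive_corruption_repairs (rename_map : List (String × String)) (out : List (String × String)) : Prop := out = derive_corruption_repairs_alt rename_map
instance (rename_map : List (String × String)) (out : List (String × String)) : Decidable (Spec_derive_corruption_repairs rename_map out) := by unfold Spec_derive_corruption_repairs; infer_instance

-- ===== CLAIM (what is proved, stated in full; the proofs are below) =====
def Claim_equal_derive_corruption_repairs : Prop := ∀ (rename_map : List (String × String)), Dom_derive_corruption_repairs rename_map → Pre_derive_corruption_repairs rename_map → Spec_derive_corruption_repairs rename_map (derive_corruption_repairs rename_map)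

-- ===== LEMMAS AND PROOFS =====

-- The "event" a pair (old_a, new_a) generates against a pair (old_b, new_b): exactly
-- the body of A's inner loop, as an optional (bad, new_b) entry.
def pvEv (a b : String × String) : Option (String × String) :=
  if a.1 = b.1 then none
  else if PySem.Str.startswith b.1 a.1 then
    let bad := a.2 ++ PySem.Str.slice b.1 (some (PySem.Str.len a.1)) none
    if bad ≠ b.2 then some (bad, b.2) else none
  else none

-- B's inner-loop step at prefix length l, as an optional (prefix, (bad, new_b)) entry.
def pvStep (lookup : PySem.Dict String String) (b : String × String) (l : Int) :
    Option (String × (String × String)) :=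
  let p := PySem.Str.slice b.1 none (some l)
  match lookup.get? p with
  | some new_a =>
    let bad := new_a ++ PySem.Str.slice b.1 (some l) none
    if bad ≠ b.2 then some (p, (bad, b.2)) else none
  | none => none

-- a fold whose body pattern-matches an optional event is a fold over the filterMap
theorem pv_foldl_filterMap {α β γ : Type} (f : α → Option β) (g : γ → β → γ) :
    ∀ (l : List α) (d : γ),
      l.foldl (fun d x => match f x with | some e => g d e | none => d) d
        = (l.filterMap f).foldl g d := by
  intro l
  induction l with
  | nil => intro d; rfl
  | cons x t ih =>
    intro d
    cases h : f x <;> simp [h, ih]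

-- filterMap of a function that is none except possibly at one member of a Nodup list
theorem pv_filterMap_eq_of_unique {α β : Type} (f : α → Option β) :
    ∀ (l : List α) (x0 : α), l.Nodup → x0 ∈ l → (∀ x ∈ l, x ≠ x0 → f x = none) →
      l.filterMap f = (f x0).toList := by
  intro l
  induction l with
  | nil => intro x0 _ h; exact absurd h (List.not_mem_nil)
  | cons x t ih =>
    intro x0 hnd hmem hnone
    rcases List.mem_cons.mp hmem with rfl | hx0t
    · have ht : ∀ y ∈ t, f y = none := by
        intro y hy
        exact hnone y (List.mem_cons_of_mem _ hy)
          (fun h => (List.nodup_cons.mp hnd).1 (h ▸ hy))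
      cases h : f x0 <;>
        simp [h, List.filterMap_eq_nil_iff.mpr ht]
    · have hx : f x = none :=
        hnone x (List.mem_cons_self) (fun h => (List.nodup_cons.mp hnd).1 (h ▸ hx0t))
      simp [hx]
      exact ih x0 (List.nodup_cons.mp hnd).2 hx0t
        (fun y hy => hnone y (List.mem_cons_of_mem _ hy))

theorem pv_flatMap_congr {α β : Type} (l : List α) (f g : α → List β)
    (h : ∀ a ∈ l, f a = g a) : l.flatMap f = l.flatMap g := by
  induction l with
  | nil => rfl
  | cons x t ih =>
    simp [List.flatMap_cons, h x List.mem_cons_self,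
      ih (fun a ha => h a (List.mem_cons_of_mem _ ha))]

theorem pv_flatMap_toList {α β : Type} (l : List α) (f : α → Option β) :
    l.flatMap (fun a => (f a).toList) = l.filterMap f := by
  induction l with
  | nil => rfl
  | cons x t ih => cases h : f x <;> simp [List.flatMap_cons, h, ih]

-- dict(pairs) looks up a member pair when keys are distinct
theorem pv_get?_foldl_insert_of_not_mem {κ ν : Type} [BEq κ] [LawfulBEq κ]
    (k : κ) : ∀ (l : List (κ × ν)) (d : PySem.Dict κ ν), k ∉ l.map Prod.fst →
    (l.foldl (fun acc p => acc.insert p.1 p.2) d).get? k = d.get? k := by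
  intro l
  induction l with
  | nil => intro d _; rfl
  | cons x t ih =>
    intro d hk
    simp only [List.map_cons, List.mem_cons, not_or] at hk
    simp only [List.foldl_cons]
    rw [ih _ hk.2, PySem.Dict.get?_insert_of_ne _ _ hk.1]

theorem pv_get?_foldl_insert_mem {κ ν : Type} [BEq κ] [LawfulBEq κ] :
    ∀ (l : List (κ × ν)) (d : PySem.Dict κ ν) (a : κ × ν), (l.map Prod.fst).Nodup →
      a ∈ l → (l.foldl (fun acc p => acc.insert p.1 p.2) d).get? a.1 = some a.2 := by
  intro l
  induction l with
  | nil => intro d a _ ha; exact absurd ha (List.not_mem_nil)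
  | cons x t ih =>
    intro d a hnd ha
    simp only [List.map_cons, List.nodup_cons] at hnd
    rcases List.mem_cons.mp ha with rfl | hat
    · simp only [List.foldl_cons]
      rw [pv_get?_foldl_insert_of_not_mem _ _ _ hnd.1, PySem.Dict.get?_insert_self]
    · exact ih _ a hnd.2 hat

theorem pv_get?_ofList (pairs : List (String × String)) (a : String × String)
    (hnd : (pairs.map Prod.fst).Nodup) (ha : a ∈ pairs) :
    (PySem.Dict.ofList pairs).get? a.1 = some a.2 :=
  pv_get?_foldl_insert_mem pairs PySem.Dict.empty a hnd ha

-- old_b[:l] for 0 ≤ l is a take on the character list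
theorem pv_take_toList (s : String) (l : Int) (h0 : 0 ≤ l) :
    (PySem.Str.slice s none (some l)).toList = s.toList.take l.toNat := by
  rw [PySem.Str.toList_slice, PySem.Chars.slice_eq_listSlice, PySem.List.slice_to _ h0]

-- the core per-pair identity: filtering B's generated events by prefix key a.1
-- yields exactly A's inner-loop events of a against b
theorem pv_inner (pairs : List (String × String)) (hnd : (pairs.map Prod.fst).Nodup)
    (a : String × String) (ha : a ∈ pairs) (b : String × String) :
    (((PySem.List.pyRange 0 (PySem.Str.len b.1) 1).filterMap
        (pvStep (PySem.Dict.ofList pairs) b)).filter (fun e => e.1 == a.1)).map (·.2)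
      = (pvEv a b).toList := by
  rw [List.filter_filterMap, List.map_filterMap]
  by_cases hpre : a.1.toList <+: b.1.toList ∧ a.1 ≠ b.1
  · -- a.1 is a proper prefix of b.1: exactly one prefix length matches
    have hk0 : a.1.toList.length < b.1.toList.length := by
      rcases lt_or_eq_of_le hpre.1.length_le with h | h
      · exact h
      · exact absurd (String.ext (List.IsPrefix.eq_of_length hpre.1 h)) hpre.2
    have hmem : ((a.1.toList.length : Int)) ∈ PySem.List.pyRange 0 (PySem.Str.len b.1) 1 := by
      rw [PySem.Str.len_eq]
      exact PySem.List.mem_pyRange_one.mpr ⟨Int.natCast_nonneg _, by exact_mod_cast hk0⟩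
    rw [pv_filterMap_eq_of_unique _ _ _ (PySem.List.nodup_pyRange_one _ _) hmem ?_]
    · -- the matching length produces exactly pvEv a b
      have hp : PySem.Str.slice b.1 none (some (a.1.toList.length : Int)) = a.1 := by
        apply String.ext
        rw [pv_take_toList _ _ (Int.natCast_nonneg _), Int.toNat_natCast]
        exact (List.prefix_iff_eq_take.mp hpre.1).symm
      have hsw : PySem.Str.startswith b.1 a.1 = true := by
        rw [PySem.Str.startswith_eq]; exact (PySem.Chars.startswith_iff _ _).mpr hpre.1
      simp only [pvStep, hp]
      rw [pv_get?_ofList pairs a hnd ha]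
      simp only [pvEv, if_neg hpre.2, hsw, if_true, PySem.Str.len_eq]
      split_ifs with hbad
      · simp [Option.filter]
      · rfl
    · -- every other prefix length is filtered away
      intro l hl hne
      rw [PySem.Str.len_eq] at hl
      obtain ⟨h0, hlt⟩ := PySem.List.mem_pyRange_one.mp hl
      have hlen : (PySem.Str.slice b.1 none (some l)).toList.length = l.toNat := by
        rw [pv_take_toList _ _ h0, List.length_take]; omega
      have hpne : PySem.Str.slice b.1 none (some l) ≠ a.1 := by
        intro h
        apply hne
        have := hlen
        rw [h] at this
        omega
      simp only [pvStep]
      rcases hget : (PySem.Dict.ofList pairs).get? (PySem.Str.slice b.1 none (some l))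
          with _ | na
      · rfl
      · dsimp only
        split_ifs
        · simp [Option.filter, hpne]
        · rfl
  · -- a.1 is not a proper prefix of b.1: no length matches, and pvEv a b = none
    have hev : pvEv a b = none := by
      unfold pvEv
      by_cases h1 : a.1 = b.1
      · simp [h1]
      · have hsw : PySem.Str.startswith b.1 a.1 = false := by
          rw [PySem.Str.startswith_eq]
          by_contra h
          exact hpre ⟨(PySem.Chars.startswith_iff _ _).mp (by simpa using h), h1⟩
        simp only [if_neg h1, hsw, Bool.false_eq_true, if_false]
    rw [hev, List.filterMap_eq_nil_iff.mpr ?_]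
    · rfl
    · intro l hl
      rw [PySem.Str.len_eq] at hl
      obtain ⟨h0, hlt⟩ := PySem.List.mem_pyRange_one.mp hl
      have hpne : PySem.Str.slice b.1 none (some l) ≠ a.1 := by
        intro h
        apply hpre
        constructor
        · rw [← h, pv_take_toList _ _ h0]; exact List.take_prefix _ _
        · intro hab
          have : (PySem.Str.slice b.1 none (some l)).toList.length = l.toNat := by
            rw [pv_take_toList _ _ h0, List.length_take]; omega
          rw [h, hab] at this
          omega
      simp only [pvStep]
      rcases hget : (PySem.Dict.ofList pairs).get? (PySem.Str.slice b.1 none (some l))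
          with _ | na
      · rfl
      · dsimp only
        split_ifs
        · simp [Option.filter, hpne]
        · rfl

theorem pv_foldl_congr {α γ : Type} (l : List α) (f g : γ → α → γ) (d : γ)
    (h : ∀ x d', f d' x = g d' x) : l.foldl f d = l.foldl g d := by
  induction l generalizing d with
  | nil => rfl
  | cons x t ih => simp only [List.foldl_cons, h, ih]

-- ===== VERDICT (by name: the statement is the Claim_ definition above) =====
theorem derive_corruption_repairs_spec : Claim_equal_derive_corruption_repairs := by
  intro rm _ hpre
  have hpre' : (rm.map Prod.fst).Nodup := hpre
  show derive_corruption_repairs rm = derive_corruption_repairs_alt rm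
  have hnd : ((PySem.List.sorted rm (fun kv => PySem.Str.len kv.1) false).map Prod.fst).Nodup :=
    (((PySem.List.sorted_perm rm (fun kv => PySem.Str.len kv.1) false).map Prod.fst).nodup_iff).mpr hpre'
  set pairs := PySem.List.sorted rm (fun kv => PySem.Str.len kv.1) false with hpairs
  set lookup := PySem.Dict.ofList pairs with hlookup
  set bigL := pairs.flatMap
    (fun b => (PySem.List.pyRange 0 (PySem.Str.len b.1) 1).filterMap (pvStep lookup b)) with hbigL
  -- A in normal form: fold the insertions over the flat list of A's events
  have hA : derive_corruption_repairs rm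
      = ((pairs.flatMap (fun a => pairs.filterMap (pvEv a))).foldl
          (fun d e => d.insert e.1 e.2) PySem.Dict.empty).items := by
    show (pairs.foldl (fun repairs a =>
        pairs.foldl (fun repairs b =>
          if a.1 = b.1 then repairs
          else if PySem.Str.startswith b.1 a.1 then
            let bad := a.2 ++ PySem.Str.slice b.1 (some (PySem.Str.len a.1)) none
            if bad ≠ b.2 then repairs.insert bad b.2 else repairs
          else repairs) repairs) PySem.Dict.empty).items = _
    rw [List.foldl_flatMap]
    congr 1
    apply pv_foldl_congr
    intro a d
    rw [← pv_foldl_filterMap (pvEv a) (fun d e => d.insert e.1 e.2) pairs d]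
    apply pv_foldl_congr
    intro b d'
    simp only [pvEv]
    split_ifs <;> rfl
  -- B's buckets in normal form: fold the bucket appends over the flat list of B's events
  have hbuck : (pairs.foldl (fun buckets b =>
        (PySem.List.pyRange 0 (PySem.Str.len b.1) 1).foldl (fun buckets l =>
          let p := PySem.Str.slice b.1 none (some l)
          match lookup.get? p with
          | some new_a =>
            let bad := new_a ++ PySem.Str.slice b.1 (some l) none
            if bad ≠ b.2 then buckets.modify p [] (· ++ [(bad, b.2)]) else buckets
          | none => buckets) buckets)
        (PySem.Dict.empty (κ := String) (ν := List (String × String))))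
      = bigL.foldl (fun d p => d.modify p.1 [] (· ++ [p.2])) PySem.Dict.empty := by
    rw [hbigL, List.foldl_flatMap]
    apply pv_foldl_congr
    intro b d
    rw [← pv_foldl_filterMap (pvStep lookup b)
      (fun (d : PySem.Dict String (List (String × String))) (e : String × (String × String)) =>
        d.modify e.1 [] (· ++ [e.2]))]
    apply pv_foldl_congr
    intro l d'
    simp only [pvStep]
    rcases (lookup.get? (PySem.Str.slice b.1 none (some l))) with _ | na
    · rfl
    · dsimp only
      split_ifs <;> rfl
  -- B in normal form
  have hB : derive_corruption_repairs_alt rm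
      = ((pairs.flatMap (fun a => (bigL.filter (fun p => p.1 == a.1)).map (fun x => x.2))).foldl
          (fun d e => d.insert e.1 e.2) PySem.Dict.empty).items := by
    show (pairs.foldl (fun repairs a =>
        ((pairs.foldl (fun buckets b =>
            (PySem.List.pyRange 0 (PySem.Str.len b.1) 1).foldl (fun buckets l =>
              let p := PySem.Str.slice b.1 none (some l)
              match lookup.get? p with
              | some new_a =>
                let bad := new_a ++ PySem.Str.slice b.1 (some l) none
                if bad ≠ b.2 then buckets.modify p [] (· ++ [(bad, b.2)]) else buckets
              | none => buckets) buckets)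
            (PySem.Dict.empty (κ := String) (ν := List (String × String)))).getD a.1 []).foldl
          (fun repairs e => repairs.insert e.1 e.2) repairs) PySem.Dict.empty).items = _
    rw [List.foldl_flatMap]
    congr 1
    apply pv_foldl_congr
    intro a d
    rw [hbuck, PySem.Dict.getD_foldl_modify_append, PySem.Dict.getD_empty, List.nil_append]
  -- the two flat event lists coincide
  rw [hA, hB]
  congr 2
  apply pv_flatMap_congr
  intro a ha
  rw [hbigL, List.filter_flatMap, List.map_flatMap,
    pv_flatMap_congr _ _ _ (fun b _ => pv_inner pairs hnd a ha b),
    pv_flatMap_toList]
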